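-- pv_equiv track=rewrite | github.com/haru124/Learn-python | memcard.py | minimum_mem_cap
-- ===== SOURCE A (Python) =====
-- from collections import defaultdict
--
-- def minimum_mem_cap(appmem, k):
--     n = len(appmem)
--     if n > k*2:   # more apps than slots
--         return 0
--     if k >= n:    # each app gets its own team
--         return max(appmem)
--
--     appmem.sort(reverse=True)
--
--     # All possible candidate capacities
--     capacities = [max(appmem)]
--     for i in range(n-1):
--         for j in range(i+1, n):
--             psum = appmem[i] + appmem[j]
--             if psum > capacities[0] and psum not in capacities:
--                 capacities.append(psum)
--     capacities.sort()
--
--     # Try each candidate capacity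
--     for cap in capacities:
--         # Fresh dictionary for each trial
--         dic = defaultdict(list)
--         for i in range(k):
--             dic[i] = [appmem[i]]
--
--         flag = 1
--         for i in range(k, n):
--             placed = False
--             for j in range(k):
--                 if len(dic[j]) < 2 and sum(dic[j]) + appmem[i] <= cap:
--                     dic[j].append(appmem[i])
--                     placed = True
--                     break
--             if not placed:   # app couldn't be assigned
--                 flag = 0
--                 break
--         if flag:
--             return cap
--
--     return 0
-- ===== SOURCE B (Python) =====
-- def minimum_mem_cap(appmem, k):
--     # Closed form: after sorting descending, the answer equals the largest of
--     # the max element and the "mirror" pair sums a[2k-1-i] + a[i] for i in [k, n)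
--     # (largest leftover app paired with the smallest preloaded one).
--     # Note: unlike A, this does not sort appmem in place.
--     n = len(appmem)
--     if n > 2 * k:
--         return 0
--     if k >= n:
--         return max(appmem)
--     a = sorted(appmem, reverse=True)
--     best = a[0]
--     for i in range(k, n):
--         s = a[2 * k - 1 - i] + a[i]
--         if s > best:
--             best = s
--     return best
-- ===== Notes on version B (the rewrite author's own statement) =====
-- stated objective: simpler
-- what changed: Replaces A's candidate-capacity enumeration with a first-fit greedy trial per candidate by the closed-form mirror pairing: one descending sort, then the answer is max(a[0], max_i a[2k-1-i]+a[i]); B does not mutate appmem (A sorts it in place).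
import Mathlib
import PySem

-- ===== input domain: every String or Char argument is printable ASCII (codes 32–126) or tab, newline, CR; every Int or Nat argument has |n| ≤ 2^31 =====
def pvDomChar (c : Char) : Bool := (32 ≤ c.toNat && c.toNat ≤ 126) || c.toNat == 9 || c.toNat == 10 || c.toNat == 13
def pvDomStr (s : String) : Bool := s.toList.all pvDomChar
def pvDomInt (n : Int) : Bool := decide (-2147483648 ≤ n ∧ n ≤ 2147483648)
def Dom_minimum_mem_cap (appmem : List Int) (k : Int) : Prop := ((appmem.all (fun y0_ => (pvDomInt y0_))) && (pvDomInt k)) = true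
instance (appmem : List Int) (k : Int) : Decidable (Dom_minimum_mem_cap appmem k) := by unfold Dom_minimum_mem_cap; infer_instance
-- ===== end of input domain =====

-- B replaces A's candidate enumeration + per-candidate first-fit trials by the closed-form
-- mirror pairing after one descending sort (objective: simpler). Return-value equivalence only:
-- A sorts appmem in place, B does not mutate it.

-- ===== PORT A =====
-- first-fit placement scan over the team bins (A's inner `for j in range(k)` loop)
def pvFFPlace (cap x : Int) : List (List Int) → Option (List (List Int))
  | [] => none
  | b :: bs =>
    if b.length < 2 ∧ b.sum + x ≤ cap then some ((b ++ [x]) :: bs)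
    else (pvFFPlace cap x bs).map (fun r => b :: r)

-- A's `for i in range(k, n)` loop with the flag/break
def pvFFGreedy (cap : Int) (items : List Int) (bins : List (List Int)) : Bool :=
  match items with
  | [] => true
  | x :: rest =>
    match pvFFPlace cap x bins with
    | some bins' => pvFFGreedy cap rest bins'
    | none => false

-- A's candidate-capacity double loop (capacities starts as [max(appmem)])
def pvBuildCaps (a : List Int) (n : Int) (mx : Int) : List Int :=
  (PySem.List.pyRange 0 (n-1) 1).foldl (fun caps i =>
    (PySem.List.pyRange (i+1) n 1).foldl (fun caps2 j =>
      let psum := PySem.List.pyGetD a i 0 + PySem.List.pyGetD a j 0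
      if psum > PySem.List.pyGetD caps2 0 0 ∧ psum ∉ caps2 then caps2 ++ [psum] else caps2) caps)
    [mx]

-- A's `for cap in capacities` loop; the defaultdict with keys 0..k-1 (inserted in key order)
-- is represented as the list of its k bins in key order (exact: the keys are exactly 0..k-1)
def pvTryCaps (a : List Int) (k n : Int) : List Int → Int
  | [] => 0
  | cap :: rest =>
    let dic := (PySem.List.pyRange 0 k 1).map (fun i => [PySem.List.pyGetD a i 0])
    if pvFFGreedy cap ((PySem.List.pyRange k n 1).map (fun i => PySem.List.pyGetD a i 0)) dic
    then cap else pvTryCaps a k n rest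

-- all pyGetD indices are in range on every admitted input (so pyGetD is exact here);
-- max? is `some` in the k ≥ n branch because Pre_ excludes the empty list there
def minimum_mem_cap (appmem : List Int) (k : Int) : Int :=
  let n : Int := appmem.length
  if n > k * 2 then 0
  else if k ≥ n then (PySem.List.max? appmem (fun x => x)).getD 0
  else
    let a := PySem.List.sorted appmem (fun x => x) true
    let capacities := pvBuildCaps a n ((PySem.List.max? a (fun x => x)).getD 0)
    pvTryCaps a k n (PySem.List.sorted capacities (fun x => x) false)

-- ===== PORT B =====
def minimum_mem_cap_alt (appmem : List Int) (k : Int) : Int :=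
  let n : Int := appmem.length
  if n > 2 * k then 0
  else if k ≥ n then (PySem.List.max? appmem (fun x => x)).getD 0
  else
    let a := PySem.List.sorted appmem (fun x => x) true
    (PySem.List.pyRange k n 1).foldl (fun best i =>
      let s := PySem.List.pyGetD a (2*k - 1 - i) 0 + PySem.List.pyGetD a i 0
      if s > best then s else best) (PySem.List.pyGetD a 0 0)

-- ===== PRECONDITION & SPEC =====
-- Pre_ excludes only the inputs where A raises: max([]) is a ValueError, reached iff appmem = [] and k ≥ 0
def Pre_minimum_mem_cap (appmem : List Int) (k : Int) : Prop := appmem = [] → k < 0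
instance (appmem : List Int) (k : Int) : Decidable (Pre_minimum_mem_cap appmem k) := by unfold Pre_minimum_mem_cap; infer_instance

def pvWitness_minimum_mem_cap : List Int × Int := ([8, 2, 4, 1, 5], 3)

def Spec_minimum_mem_cap (appmem : List Int) (k : Int) (out : Int) : Prop := out = minimum_mem_cap_alt appmem k
instance (appmem : List Int) (k : Int) (out : Int) : Decidable (Spec_minimum_mem_cap appmem k out) := by unfold Spec_minimum_mem_cap; infer_instance

-- ===== CLAIM (what is proved, stated in full; the proofs are below) =====
def Claim_equal_minimum_mem_cap : Prop := ∀ (appmem : List Int) (k : Int), Dom_minimum_mem_cap appmem k → Pre_minimum_mem_cap appmem k → Spec_minimum_mem_cap appmem k (minimum_mem_cap appmem k)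

-- ===== LEMMAS AND PROOFS =====

-- Abstract view of A's greedy state: each bin is (initial load, has a second member)
def pvAPlace (cap x : Int) : List (Int × Bool) → Option (List (Int × Bool))
  | [] => none
  | (v, fl) :: st =>
    if fl = false ∧ v + x ≤ cap then some ((v, true) :: st)
    else (pvAPlace cap x st).map (fun r => (v, fl) :: r)

def pvAGreedy (cap : Int) : List Int → List (Int × Bool) → Bool
  | [], _ => true
  | x :: rest, st =>
    match pvAPlace cap x st with
    | some st' => pvAGreedy cap rest st'
    | none => false

inductive pvRel : List (List Int) → List (Int × Bool) → Prop
  | nil : pvRel [] []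
  | single (v : Int) {bs st} : pvRel bs st → pvRel ([v] :: bs) ((v, false) :: st)
  | pair (v w : Int) {bs st} : pvRel bs st → pvRel ([v, w] :: bs) ((v, true) :: st)

theorem pvPlace_sim (cap x : Int) {bins st} (h : pvRel bins st) :
    (pvFFPlace cap x bins = none ∧ pvAPlace cap x st = none) ∨
    ∃ bins' st', pvFFPlace cap x bins = some bins' ∧ pvAPlace cap x st = some st' ∧ pvRel bins' st' := by
  induction h with
  | nil => left; simp [pvFFPlace, pvAPlace]
  | single v h ih =>
    by_cases hc : v + x ≤ cap
    · right
      refine ⟨[v, x] :: _, (v, true) :: _, ?_, ?_, pvRel.pair v x h⟩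
      · simp [pvFFPlace, hc]
      · simp [pvAPlace, hc]
    · have hc1 : ¬ (([v] : List Int).length < 2 ∧ ([v] : List Int).sum + x ≤ cap) := by
        simp only [List.length_cons, List.length_nil, List.sum_cons, List.sum_nil]; omega
      have hc2 : ¬ ((false : Bool) = false ∧ v + x ≤ cap) := by
        rintro ⟨-, hh⟩; exact hc hh
      rcases ih with ⟨h1, h2⟩ | ⟨bins', st', h1, h2, h3⟩
      · left
        exact ⟨by simp [pvFFPlace, hc, h1], by simp [pvAPlace, hc, h2]⟩
      · right
        refine ⟨[v] :: bins', (v, false) :: st', ?_, ?_, pvRel.single v h3⟩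
        · simp [pvFFPlace, hc, h1]
        · simp [pvAPlace, hc, h2]
  | pair v w h ih =>
    have hc1 : ¬ (([v, w] : List Int).length < 2 ∧ ([v, w] : List Int).sum + x ≤ cap) := by simp
    have hc2 : ¬ ((true : Bool) = false ∧ v + x ≤ cap) := by simp
    rcases ih with ⟨h1, h2⟩ | ⟨bins', st', h1, h2, h3⟩
    · left
      exact ⟨by simp [pvFFPlace, h1], by simp [pvAPlace, h2]⟩
    · right
      refine ⟨[v, w] :: bins', (v, true) :: st', ?_, ?_, pvRel.pair v w h3⟩
      · simp [pvFFPlace, h1]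
      · simp [pvAPlace, h2]


theorem pvGreedy_sim (cap : Int) (items : List Int) : ∀ {bins st}, pvRel bins st →
    pvFFGreedy cap items bins = pvAGreedy cap items st := by
  induction items with
  | nil => intro bins st h; simp [pvFFGreedy, pvAGreedy]
  | cons x rest ih =>
    intro bins st h
    rcases pvPlace_sim cap x h with ⟨h1, h2⟩ | ⟨bins', st', h1, h2, h3⟩
    · simp [pvFFGreedy, pvAGreedy, h1, h2]
    · simp [pvFFGreedy, pvAGreedy, h1, h2, ih h3]


theorem pvRel_init (l : List Int) :
    pvRel (l.map (fun v => [v])) (l.map (fun v => (v, false))) := by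
  induction l with
  | nil => exact pvRel.nil
  | cons v l ih => exact pvRel.single v ih


theorem pvAPlace_some (cap x : Int) : ∀ st st', pvAPlace cap x st = some st' →
    ∃ pre v suf, st = pre ++ (v, false) :: suf ∧ st' = pre ++ (v, true) :: suf ∧ v + x ≤ cap := by
  intro st
  induction st with
  | nil => intro st' h; simp [pvAPlace] at h
  | cons p st ih =>
    obtain ⟨v, fl⟩ := p
    intro st' h
    by_cases hc : fl = false ∧ v + x ≤ cap
    · simp only [pvAPlace, if_pos hc] at h
      exact ⟨[], v, st, by simp [hc.1], by simp [(Option.some_injective _ h).symm], hc.2⟩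
    · simp only [pvAPlace, if_neg hc, Option.map_eq_some_iff] at h
      obtain ⟨r, hr, hst'⟩ := h
      obtain ⟨pre, w, suf, h1, h2, h3⟩ := ih r hr
      exact ⟨(v, fl) :: pre, w, suf, by simp [h1], by simp [← hst', h2], h3⟩


theorem pvAPlace_exists (cap x : Int) : ∀ st, (∃ p ∈ st, p.2 = false ∧ p.1 + x ≤ cap) →
    ∃ st', pvAPlace cap x st = some st' := by
  intro st
  induction st with
  | nil => rintro ⟨p, hp, -⟩; simp at hp
  | cons q st ih =>
    obtain ⟨v, fl⟩ := q
    rintro ⟨p, hp, hp2, hp3⟩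
    by_cases hc : fl = false ∧ v + x ≤ cap
    · exact ⟨(v, true) :: st, by simp [pvAPlace, hc]⟩
    · have hmem : p ∈ st := by
        rcases List.mem_cons.1 hp with h | h
        · exfalso; apply hc; rw [h] at hp2 hp3; exact ⟨hp2, hp3⟩
        · exact h
      obtain ⟨st', hst'⟩ := ih ⟨p, hmem, hp2, hp3⟩
      exact ⟨(v, fl) :: st', by simp [pvAPlace, hc, hst']⟩


-- lower-bound invariant: a successful greedy run never places more items of value ≥ w
-- than there are free bins of load ≤ cap - w
theorem pvGreedy_lower (cap : Int) : ∀ (items : List Int) (st : List (Int × Bool)),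
    pvAGreedy cap items st = true → ∀ w : Int,
    items.countP (fun x => decide (w ≤ x)) ≤ st.countP (fun p => !p.2 && decide (p.1 ≤ cap - w)) := by
  intro items
  induction items with
  | nil => intro st h w; simp
  | cons x rest ih =>
    intro st h w
    cases hpl : pvAPlace cap x st with
    | none =>
      simp only [pvAGreedy, hpl] at h
      exact absurd h (by decide)
    | some st' =>
      simp only [pvAGreedy, hpl] at h
      obtain ⟨pre, v, suf, h1, h2, h3⟩ := pvAPlace_some cap x st st' hpl
      have hih := ih st' h w
      subst h1 h2
      simp only [List.countP_cons, List.countP_append] at hih ⊢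
      by_cases hw : w ≤ x
      · have hv : v ≤ cap - w := by omega
        simp [hw, hv] at hih ⊢
        omega
      · simp [hw] at hih ⊢
        omega


-- descending order, getD form
theorem pvMono (a : List Int) (ha : a.Pairwise (fun x y => y ≤ x)) :
    ∀ p q : Nat, p ≤ q → q < a.length → a.getD q 0 ≤ a.getD p 0 := by
  intro p q hpq hq
  rcases Nat.eq_or_lt_of_le hpq with h | h
  · rw [h]
  · have hp : p < a.length := lt_trans h hq
    rw [List.getD_eq_getElem a 0 hq, List.getD_eq_getElem a 0 hp]
    exact (List.pairwise_iff_getElem.1 ha) p q hp hq h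


def pvMC (a : List Int) (K : Nat) (cap : Int) : Prop :=
  ∀ i : Nat, K ≤ i → i < a.length → a.getD (2*K-1-i) 0 + a.getD i 0 ≤ cap

theorem pvCountFalse (l : List (Int × Bool)) :
    l.countP (fun p => !p.2) = l.length - l.countP (fun p => p.2) := by
  induction l with
  | nil => simp
  | cons p l ih =>
    have hle := List.countP_le_length (l := l) (p := fun p => p.2)
    cases hp : p.2 <;> (simp [hp, ih]; try omega)

theorem pvGreedy_success (cap : Int) (a : List Int) (K : Nat)
    (ha : a.Pairwise (fun x y => y ≤ x)) (hK1 : 1 ≤ K) (hKN : K < a.length) (hN2K : a.length ≤ 2*K)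
    (hMC : pvMC a K cap) :
    ∀ m i st, a.length - i ≤ m → K ≤ i → i ≤ a.length →
      st.map Prod.fst = a.take K → st.countP (fun p => p.2) = i - K →
      pvAGreedy cap (a.drop i) st = true := by
  intro m
  induction m with
  | zero =>
    intro i st hm hKi hiN hmap hcount
    have hi : i = a.length := by omega
    rw [hi, List.drop_length]
    rfl
  | succ m ih =>
    intro i st hm hKi hiN hmap hcount
    by_cases hiN' : i < a.length
    · rw [List.drop_eq_getElem_cons hiN']
      have hstlen : st.length = K := by
        have h := congrArg List.length hmap
        simp only [List.length_map, List.length_take] at h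
        omega
      have hPK : 2*K - 1 - i < K := by omega
      have hPi : 2*K - 1 - i < a.length := by omega
      -- a free fitting bin exists in the suffix of st from index 2K-1-i
      have hdlen : (st.drop (2*K - 1 - i)).length = K - (2*K - 1 - i) := by
        simp [hstlen]
      have htr : (st.drop (2*K - 1 - i)).countP (fun p => p.2) ≤ i - K := by
        have hsp : (st.take (2*K - 1 - i)).countP (fun p => p.2)
            + (st.drop (2*K - 1 - i)).countP (fun p => p.2) = i - K := by
          rw [← List.countP_append, List.take_append_drop, hcount]
        omega
      have hfalse : 0 < (st.drop (2*K - 1 - i)).countP (fun p => !p.2) := by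
        rw [pvCountFalse, hdlen]; omega
      obtain ⟨p, hpmem, hpf⟩ := List.countP_pos_iff.1 hfalse
      have hpfalse : p.2 = false := by
        cases hp2 : p.2
        · rfl
        · rw [hp2] at hpf; exact absurd hpf (by decide)
      -- the load of that bin is at most a[2K-1-i]
      have hfst : p.1 ∈ (a.take K).drop (2*K - 1 - i) := by
        rw [← hmap, ← List.map_drop]
        exact List.mem_map_of_mem hpmem
      obtain ⟨mi, hmi, heq⟩ := List.mem_iff_getElem.1 hfst
      have hmi' : (2*K - 1 - i) + mi < K := by
        simp only [List.length_drop, List.length_take] at hmi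
        omega
      have hload : p.1 = a.getD ((2*K - 1 - i) + mi) 0 := by
        rw [List.getD_eq_getElem a 0 (by omega)]
        rw [← heq, List.getElem_drop, List.getElem_take]
      have hple : p.1 ≤ a.getD (2*K - 1 - i) 0 := by
        rw [hload]
        exact pvMono a ha _ _ (Nat.le_add_right _ _) (by omega)
      have hfit : p.1 + a[i] ≤ cap := by
        have hmc := hMC i hKi hiN'
        rw [List.getD_eq_getElem a 0 hiN'] at hmc
        omega
      obtain ⟨st', hst'⟩ := pvAPlace_exists cap a[i] st
        ⟨p, List.mem_of_mem_drop hpmem, hpfalse, hfit⟩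
      obtain ⟨pre, v, suf, h1, h2, h3⟩ := pvAPlace_some cap a[i] st st' hst'
      simp only [pvAGreedy, hst']
      apply ih (i+1) st' (by omega) (by omega) (by omega)
      · rw [h2]
        rw [h1] at hmap
        simpa using hmap
      · rw [h2]
        rw [h1] at hcount
        simp only [List.countP_append, List.countP_cons] at hcount ⊢
        simp only [Bool.false_eq_true, if_false, if_true] at hcount ⊢
        omega
    · have hi : i = a.length := by omega
      rw [hi, List.drop_length]
      rfl


theorem pvGreedy_gives_MC (cap : Int) (a : List Int) (K : Nat)
    (ha : a.Pairwise (fun x y => y ≤ x)) (hK1 : 1 ≤ K) (hKN : K < a.length) (hN2K : a.length ≤ 2*K)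
    (hs : pvAGreedy cap (a.drop K) ((a.take K).map (fun v => (v, false))) = true) :
    pvMC a K cap := by
  intro i hKi hiN
  by_contra hlt
  have hK0 : K ≤ a.length := le_of_lt hKN
  have hPK : 2*K - 1 - i < K := by omega
  -- instantiate the invariant at w = a[i]
  have hlow := pvGreedy_lower cap (a.drop K) ((a.take K).map (fun v => (v, false))) hs (a.getD i 0)
  -- the right side is the number of small enough loads among the first K
  have hav : ((a.take K).map (fun v => (v, false))).countP (fun p => !p.2 && decide (p.1 ≤ cap - a.getD i 0))
      = (a.take K).countP (fun v => decide (v ≤ cap - a.getD i 0)) := by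
    rw [List.countP_map]
    rfl
  rw [hav] at hlow
  -- lower bound for the left side: the items a[K..i] all have value ≥ a[i]
  have hlhs : i + 1 - K ≤ (a.drop K).countP (fun x => decide (a.getD i 0 ≤ x)) := by
    have hsp : ((a.drop K).take (i + 1 - K)).countP (fun x => decide (a.getD i 0 ≤ x))
        + ((a.drop K).drop (i + 1 - K)).countP (fun x => decide (a.getD i 0 ≤ x))
        = (a.drop K).countP (fun x => decide (a.getD i 0 ≤ x)) := by
      rw [← List.countP_append, List.take_append_drop]
    have hall : ((a.drop K).take (i + 1 - K)).countP (fun x => decide (a.getD i 0 ≤ x))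
        = ((a.drop K).take (i + 1 - K)).length := by
      apply List.countP_eq_length.2
      intro x hx
      obtain ⟨mi, hmi, heq⟩ := List.mem_iff_getElem.1 hx
      simp only [List.length_take, List.length_drop] at hmi
      have hmi2 : K + mi < a.length := by omega
      have hx2 : x = a.getD (K + mi) 0 := by
        rw [List.getD_eq_getElem a 0 hmi2, ← heq, List.getElem_take, List.getElem_drop]
      rw [hx2]
      exact decide_eq_true (pvMono a ha (K + mi) i (by omega) hiN)
    have hlen : ((a.drop K).take (i + 1 - K)).length = i + 1 - K := by
      simp; omega
    have hle := List.countP_le_length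
      (l := (a.drop K).drop (i + 1 - K)) (p := fun x => decide (a.getD i 0 ≤ x))
    omega
  -- upper bound for the right side: the first 2K-i loads are all too large
  have hrhs : (a.take K).countP (fun v => decide (v ≤ cap - a.getD i 0)) ≤ i - K := by
    have hsp : ((a.take K).take (2*K - i)).countP (fun v => decide (v ≤ cap - a.getD i 0))
        + ((a.take K).drop (2*K - i)).countP (fun v => decide (v ≤ cap - a.getD i 0))
        = (a.take K).countP (fun v => decide (v ≤ cap - a.getD i 0)) := by
      rw [← List.countP_append, List.take_append_drop]
    have hz : ((a.take K).take (2*K - i)).countP (fun v => decide (v ≤ cap - a.getD i 0)) = 0 := by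
      apply List.countP_eq_zero.2
      intro v hv
      obtain ⟨mi, hmi, heq⟩ := List.mem_iff_getElem.1 hv
      simp only [List.length_take] at hmi
      have hmi2 : mi < a.length := by omega
      have hv2 : v = a.getD mi 0 := by
        rw [List.getD_eq_getElem a 0 hmi2, ← heq, List.getElem_take, List.getElem_take]
      have hge : a.getD (2*K - 1 - i) 0 ≤ a.getD mi 0 := pvMono a ha mi (2*K - 1 - i) (by omega) (by omega)
      rw [hv2]
      simp only [decide_eq_true_eq]
      omega
    have hle := List.countP_le_length
      (l := (a.take K).drop (2*K - i)) (p := fun v => decide (v ≤ cap - a.getD i 0))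
    have hlen : ((a.take K).drop (2*K - i)).length = K - (2*K - i) := by
      simp [Nat.min_eq_left hK0]
    omega
  omega


theorem pvGreedy_iff (cap : Int) (a : List Int) (K : Nat)
    (ha : a.Pairwise (fun x y => y ≤ x)) (hK1 : 1 ≤ K) (hKN : K < a.length) (hN2K : a.length ≤ 2*K) :
    (pvAGreedy cap (a.drop K) ((a.take K).map (fun v => (v, false))) = true) ↔ pvMC a K cap := by
  constructor
  · exact pvGreedy_gives_MC cap a K ha hK1 hKN hN2K
  · intro hMC
    apply pvGreedy_success cap a K ha hK1 hKN hN2K hMC (a.length - K) K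
    · omega
    · omega
    · omega
    · simp only [List.map_map]
      simp [Function.comp_def]
    · rw [List.countP_map]
      simp [Function.comp_def]


-- ----- candidate-list lemmas -----

def pvStep (a : List Int) (i : Int) (caps2 : List Int) (j : Int) : List Int :=
  if PySem.List.pyGetD a i 0 + PySem.List.pyGetD a j 0 > PySem.List.pyGetD caps2 0 0 ∧
      PySem.List.pyGetD a i 0 + PySem.List.pyGetD a j 0 ∉ caps2
  then caps2 ++ [PySem.List.pyGetD a i 0 + PySem.List.pyGetD a j 0] else caps2

theorem pvBuildCaps_eq (a : List Int) (n mx : Int) :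
    pvBuildCaps a n mx =
      (PySem.List.pyRange 0 (n-1) 1).foldl
        (fun caps i => (PySem.List.pyRange (i+1) n 1).foldl (pvStep a i) caps) [mx] := rfl

def pvQ (mx : Int) (caps : List Int) : Prop := caps.head? = some mx ∧ ∀ c ∈ caps, mx ≤ c

theorem pvStep_subset (a : List Int) (i : Int) (caps : List Int) (j : Int) : caps ⊆ pvStep a i caps j := by
  intro c hc
  unfold pvStep
  split
  · exact List.mem_append_left _ hc
  · exact hc


theorem pvFoldl_subset {α : Type} (f : List Int → α → List Int) (hf : ∀ caps j, caps ⊆ f caps j) :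
    ∀ (l : List α) (caps : List Int), caps ⊆ l.foldl f caps := by
  intro l
  induction l with
  | nil => intro caps; exact fun c hc => hc
  | cons x l ih =>
    intro caps c hc
    exact ih (f caps x) (hf caps x hc)


theorem pvStep_Q (a : List Int) (i mx : Int) (caps : List Int) (j : Int) (h : pvQ mx caps) :
    pvQ mx (pvStep a i caps j) := by
  obtain ⟨h1, h2⟩ := h
  unfold pvStep
  split
  · rename_i hcond
    obtain ⟨c0, t, rfl⟩ : ∃ c0 t, caps = c0 :: t := by
      cases caps with
      | nil => simp at h1
      | cons c0 t => exact ⟨c0, t, rfl⟩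
    have hc0 : c0 = mx := by simpa using h1
    constructor
    · simp [hc0]
    · intro c hc
      rcases List.mem_append.1 hc with h | h
      · exact h2 c h
      · have hh : PySem.List.pyGetD (c0 :: t) (0 : Int) 0 = mx := by
          simp [PySem.List.pyGetD_zero, hc0]
        simp only [List.mem_singleton] at h
        rw [h]
        have := hcond.1
        rw [hh] at this
        omega
  · exact ⟨h1, h2⟩


theorem pvFoldl_Q {α : Type} (mx : Int) (f : List Int → α → List Int)
    (hf : ∀ caps j, pvQ mx caps → pvQ mx (f caps j)) :
    ∀ (l : List α) (caps : List Int), pvQ mx caps → pvQ mx (l.foldl f caps) := by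
  intro l
  induction l with
  | nil => intro caps h; exact h
  | cons x l ih => intro caps h; exact ih (f caps x) (hf caps x h)


theorem pvInner_adds (a : List Int) (i mx : Int) :
    ∀ (l : List Int) (caps : List Int) (j : Int), pvQ mx caps → j ∈ l →
      mx < PySem.List.pyGetD a i 0 + PySem.List.pyGetD a j 0 →
      PySem.List.pyGetD a i 0 + PySem.List.pyGetD a j 0 ∈ l.foldl (pvStep a i) caps := by
  intro l
  induction l with
  | nil => intro caps j h hj; simp at hj
  | cons j0 l ih =>
    intro caps j hQ hj hgt
    rcases List.mem_cons.1 hj with rfl | hj'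
    · -- j is processed now: afterwards the sum is a member, and stays one
      have hmem : PySem.List.pyGetD a i 0 + PySem.List.pyGetD a j 0 ∈ pvStep a i caps j := by
        by_cases hin : PySem.List.pyGetD a i 0 + PySem.List.pyGetD a j 0 ∈ caps
        · exact pvStep_subset a i caps j hin
        · obtain ⟨h1, h2⟩ := hQ
          obtain ⟨c0, t, rfl⟩ : ∃ c0 t, caps = c0 :: t := by
            cases caps with
            | nil => simp at h1
            | cons c0 t => exact ⟨c0, t, rfl⟩
          have hc0 : c0 = mx := by simpa using h1
          have hh : PySem.List.pyGetD (c0 :: t) (0 : Int) 0 = mx := by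
            simp [PySem.List.pyGetD_zero, hc0]
          unfold pvStep
          rw [if_pos ⟨by rw [hh]; omega, hin⟩]
          simp
      rw [List.foldl_cons]
      exact pvFoldl_subset (pvStep a i) (pvStep_subset a i) l (pvStep a i caps j) hmem
    · rw [List.foldl_cons]
      exact ih (pvStep a i caps j0) j (pvStep_Q a i mx caps j0 hQ) hj' hgt


theorem pvBuildCaps_Q (a : List Int) (n mx : Int) : pvQ mx (pvBuildCaps a n mx) := by
  rw [pvBuildCaps_eq]
  refine pvFoldl_Q mx _
    (fun caps i h => pvFoldl_Q mx (pvStep a i) (fun c j h' => pvStep_Q a i mx c j h') _ caps h)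
    _ _ ?_
  exact ⟨rfl, by intro c hc; simp at hc; omega⟩


theorem pvBuildCaps_pair_mem (a : List Int) (n mx : Int) (i j : Int)
    (h0 : 0 ≤ i) (hij : i < j) (hjn : j < n)
    (hgt : mx < PySem.List.pyGetD a i 0 + PySem.List.pyGetD a j 0) :
    PySem.List.pyGetD a i 0 + PySem.List.pyGetD a j 0 ∈ pvBuildCaps a n mx := by
  rw [pvBuildCaps_eq]
  have hQ0 : pvQ mx [mx] := ⟨rfl, by intro c hc; simp at hc; omega⟩
  have hi : i ∈ PySem.List.pyRange 0 (n-1) 1 := PySem.List.mem_pyRange_one.2 ⟨h0, by omega⟩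
  obtain ⟨l1, l2, hsplit⟩ := List.append_of_mem hi
  rw [hsplit, List.foldl_append, List.foldl_cons]
  have hQ1 : pvQ mx (l1.foldl (fun caps i => (PySem.List.pyRange (i+1) n 1).foldl (pvStep a i) caps) [mx]) :=
    pvFoldl_Q mx _
      (fun caps i' h => pvFoldl_Q mx (pvStep a i') (fun c j' h' => pvStep_Q a i' mx c j' h') _ caps h)
      l1 [mx] hQ0
  have hj : j ∈ PySem.List.pyRange (i+1) n 1 := PySem.List.mem_pyRange_one.2 ⟨by omega, hjn⟩
  have hadd := pvInner_adds a i mx _ _ j hQ1 hj hgt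
  exact pvFoldl_subset _
    (fun caps i' => pvFoldl_subset (pvStep a i') (pvStep_subset a i') _ caps) l2 _ hadd


-- first hit of an ascending candidate scan
theorem pvTryCaps_spec (a : List Int) (k n : Int) (P : Int → Prop) (V : Int)
    (hgo : ∀ cap, (pvFFGreedy cap ((PySem.List.pyRange k n 1).map (fun i => PySem.List.pyGetD a i 0))
        ((PySem.List.pyRange 0 k 1).map (fun i => [PySem.List.pyGetD a i 0])) = true) ↔ P cap) :
    ∀ L : List Int, L.Pairwise (· ≤ ·) → V ∈ L → P V → (∀ c ∈ L, P c → V ≤ c) →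
      pvTryCaps a k n L = V := by
  intro L
  induction L with
  | nil => intro _ hV; simp at hV
  | cons c rest ih =>
    intro hpw hV hPV hmin
    have hunf : pvTryCaps a k n (c :: rest) =
        if pvFFGreedy c ((PySem.List.pyRange k n 1).map (fun i => PySem.List.pyGetD a i 0))
            ((PySem.List.pyRange 0 k 1).map (fun i => [PySem.List.pyGetD a i 0])) = true
        then c else pvTryCaps a k n rest := by
      simp [pvTryCaps]
    by_cases hP : P c
    · rw [hunf, if_pos ((hgo c).2 hP)]
      have hcV : c ≤ V := by
        rcases List.mem_cons.1 hV with rfl | hV'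
        · exact le_rfl
        · exact (List.pairwise_cons.1 hpw).1 V hV'
      exact le_antisymm hcV (hmin c List.mem_cons_self hP)
    · rw [hunf, if_neg (fun hh => hP ((hgo c).1 hh))]
      have hVrest : V ∈ rest := by
        rcases List.mem_cons.1 hV with rfl | hV'
        · exact absurd hPV hP
        · exact hV'
      exact ih (List.pairwise_cons.1 hpw).2 hVrest hPV
        (fun c' h' hp' => hmin c' (List.mem_cons_of_mem c h') hp')


-- ----- final assembly -----

theorem pvHeadMem {l : List Int} {x : Int} (h : l.head? = some x) : x ∈ l := by
  cases l with
  | nil => simp at h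
  | cons y t =>
    simp only [List.head?_cons, Option.some.injEq] at h
    rw [← h]
    exact List.mem_cons_self

theorem pvHeadMax (a : List Int) (ha : a.Pairwise (fun x y => y ≤ x)) (hne : a ≠ []) :
    (PySem.List.max? a (fun x => x)).getD 0 = a.getD 0 0 := by
  cases a with
  | nil => exact absurd rfl hne
  | cons a0 t =>
    rw [PySem.List.max?_id_cons]
    simp only [Option.getD_some, List.getD_cons_zero]
    rcases PySem.List.foldl_max_mem t a0 with h | h
    · exact h
    · exact le_antisymm ((List.pairwise_cons.1 ha).1 _ h) (PySem.List.le_foldl_max t a0).1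

theorem pvMainBranch (appmem : List Int) (k : Int)
    (hk : k < (appmem.length : Int)) (h2k : (appmem.length : Int) ≤ k * 2) :
    pvTryCaps (PySem.List.sorted appmem (fun x => x) true) k (appmem.length : Int)
      (PySem.List.sorted
        (pvBuildCaps (PySem.List.sorted appmem (fun x => x) true) (appmem.length : Int)
          ((PySem.List.max? (PySem.List.sorted appmem (fun x => x) true) (fun x => x)).getD 0))
        (fun x => x) false)
    = (PySem.List.pyRange k (appmem.length : Int) 1).foldl
        (fun best i =>
          if PySem.List.pyGetD (PySem.List.sorted appmem (fun x => x) true) (2*k - 1 - i) 0 +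
              PySem.List.pyGetD (PySem.List.sorted appmem (fun x => x) true) i 0 > best
          then PySem.List.pyGetD (PySem.List.sorted appmem (fun x => x) true) (2*k - 1 - i) 0 +
              PySem.List.pyGetD (PySem.List.sorted appmem (fun x => x) true) i 0
          else best)
        (PySem.List.pyGetD (PySem.List.sorted appmem (fun x => x) true) 0 0) := by
  set a := PySem.List.sorted appmem (fun x => x) true with ha_def
  have halen : a.length = appmem.length := PySem.List.length_sorted appmem _ true
  have hapair : a.Pairwise (fun x y => y ≤ x) := PySem.List.sorted_pairwise_rev appmem (fun x => x)
  set K := k.toNat with hK_def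
  have hKcast : (K : Int) = k := Int.toNat_of_nonneg (by omega)
  have hK1 : 1 ≤ K := by omega
  have hKN : K < a.length := by omega
  have hN2K : a.length ≤ 2*K := by omega
  have hane : a ≠ [] := by
    intro h
    rw [h] at halen
    simp only [List.length_nil] at halen
    omega
  have hmx : (PySem.List.max? a (fun x => x)).getD 0 = a.getD 0 0 := pvHeadMax a hapair hane
  rw [hmx]
  set a0 := a.getD 0 0 with ha0
  set M := a.length - K with hM
  set f : Nat → Int := fun m => a.getD (K-1-m) 0 + a.getD (K+m) 0 with hf
  set V := ((List.range M).map f).foldl max a0 with hV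
  have hVfacts := PySem.List.le_foldl_max ((List.range M).map f) a0
  have hVmem := PySem.List.foldl_max_mem ((List.range M).map f) a0
  rw [← hV] at hVfacts hVmem
  -- the B-side fold computes V
  have hB : (PySem.List.pyRange k (appmem.length : Int) 1).foldl
      (fun best i =>
        if PySem.List.pyGetD a (2*k - 1 - i) 0 + PySem.List.pyGetD a i 0 > best
        then PySem.List.pyGetD a (2*k - 1 - i) 0 + PySem.List.pyGetD a i 0
        else best)
      (PySem.List.pyGetD a 0 0) = V := by
    have hVeq : V = (List.range M).foldl (fun acc m => max acc (f m)) a0 := by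
      rw [hV, List.foldl_map]
    rw [PySem.List.pyRange_one, List.foldl_map, PySem.List.pyGetD_zero, ← ha0, hVeq]
    have hM2 : ((appmem.length : Int) - k).toNat = M := by omega
    rw [hM2]
    apply PySem.List.foldl_congr_mem
    intro acc m hm
    have hmM : m < M := List.mem_range.1 hm
    have e1 : 2*k - 1 - (k + (m:Int)) = ((K - 1 - m : Nat) : Int) := by omega
    have e2 : k + (m:Int) = ((K + m : Nat) : Int) := by omega
    rw [e1, e2, PySem.List.pyGetD_natCast, PySem.List.pyGetD_natCast]
    simp only [hf]
    rw [max_def]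
    split_ifs <;> omega
  -- the items of the greedy loop are a[k:], the bins start as the singletons of a[:k]
  have hitems : (PySem.List.pyRange k (appmem.length : Int) 1).map
      (fun i => PySem.List.pyGetD a i 0) = a.drop K := by
    rw [PySem.List.pyRange_one, List.map_map]
    apply List.ext_getElem
    · simp only [List.length_map, List.length_range, List.length_drop]
      omega
    · intro m h1 h2
      simp only [List.length_map, List.length_range] at h1
      simp only [List.getElem_map, List.getElem_range, Function.comp_apply, List.getElem_drop]
      have e2 : k + (m:Int) = ((K + m : Nat) : Int) := by omega
      rw [e2, PySem.List.pyGetD_natCast, List.getD_eq_getElem a 0 (by omega)]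
  have hdic : (PySem.List.pyRange 0 k 1).map (fun i => [PySem.List.pyGetD a i 0])
      = (a.take K).map (fun v => [v]) := by
    rw [PySem.List.pyRange_one, List.map_map]
    apply List.ext_getElem
    · simp only [List.length_map, List.length_range, List.length_take]
      omega
    · intro m h1 h2
      simp only [List.length_map, List.length_range] at h1
      simp only [List.getElem_map, List.getElem_range, Function.comp_apply, List.getElem_take]
      have e2 : (0:Int) + (m:Int) = ((m : Nat) : Int) := by omega
      rw [e2, PySem.List.pyGetD_natCast, List.getD_eq_getElem a 0 (by omega)]
  have hgo : ∀ cap, (pvFFGreedy cap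
      ((PySem.List.pyRange k (appmem.length : Int) 1).map (fun i => PySem.List.pyGetD a i 0))
      ((PySem.List.pyRange 0 k 1).map (fun i => [PySem.List.pyGetD a i 0])) = true) ↔ pvMC a K cap := by
    intro cap
    rw [hitems, hdic, pvGreedy_sim cap (a.drop K) (pvRel_init (a.take K))]
    exact pvGreedy_iff cap a K hapair hK1 hKN hN2K
  have hQ := pvBuildCaps_Q a (appmem.length : Int) a0
  -- V dominates a0 and every mirror pair sum
  have hPV : pvMC a K V := by
    intro i hKi hiN
    have hm : i - K < M := by omega
    have hmem : f (i - K) ∈ (List.range M).map f := List.mem_map_of_mem (List.mem_range.2 hm)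
    have hle := hVfacts.2 _ hmem
    have e3 : K - 1 - (i - K) = 2*K - 1 - i := by omega
    have e4 : K + (i - K) = i := by omega
    simp only [hf, e3, e4] at hle
    exact hle
  -- V is one of A's candidate capacities
  have hVcaps : V ∈ pvBuildCaps a (appmem.length : Int) a0 := by
    by_cases hcase : V = a0
    · rw [hcase]
      exact pvHeadMem hQ.1
    · have hgt : a0 < V := lt_of_le_of_ne hVfacts.1 (Ne.symm hcase)
      rcases hVmem with h | h
      · exact absurd h hcase
      · obtain ⟨m, hm, hfm⟩ := List.mem_map.1 h
        have hmM : m < M := List.mem_range.1 hm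
        have e5 : ((K - 1 - m : Nat) : Int) = ((K:Int) - 1 - m) := by omega
        have e6 : ((K + m : Nat) : Int) = ((K:Int) + m) := by omega
        have hpm := pvBuildCaps_pair_mem a (appmem.length : Int) a0
          ((K - 1 - m : Nat) : Int) ((K + m : Nat) : Int)
          (by omega) (by omega) (by omega)
          (by rw [PySem.List.pyGetD_natCast, PySem.List.pyGetD_natCast]
              rw [show (a.getD (K-1-m) 0 + a.getD (K+m) 0) = f m from rfl, hfm]
              exact hgt)
        rw [PySem.List.pyGetD_natCast, PySem.List.pyGetD_natCast] at hpm
        rw [show (a.getD (K-1-m) 0 + a.getD (K+m) 0) = f m from rfl, hfm] at hpm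
        exact hpm
  rw [hB]
  apply pvTryCaps_spec a k (appmem.length : Int) (pvMC a K) V hgo
  · exact PySem.List.sorted_pairwise (pvBuildCaps a (appmem.length : Int) a0) (fun x => x)
  · exact (PySem.List.mem_sorted _ _ _ V).2 hVcaps
  · exact hPV
  · intro c hc hMCc
    have hcge : a0 ≤ c := hQ.2 c ((PySem.List.mem_sorted _ _ _ c).1 hc)
    rcases hVmem with h | h
    · rw [h]; exact hcge
    · obtain ⟨m, hm, hfm⟩ := List.mem_map.1 h
      have hmM : m < M := List.mem_range.1 hm
      have hmc := hMCc (K + m) (by omega) (by omega)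
      have e3 : 2*K - 1 - (K + m) = K - 1 - m := by omega
      rw [e3] at hmc
      rw [← hfm]
      exact hmc

theorem pvEquiv (appmem : List Int) (k : Int) :
    minimum_mem_cap appmem k = minimum_mem_cap_alt appmem k := by
  simp only [minimum_mem_cap, minimum_mem_cap_alt]
  by_cases hb1 : (appmem.length : Int) > k * 2
  · rw [if_pos hb1, if_pos (show (appmem.length : Int) > 2 * k by omega)]
  · rw [if_neg hb1, if_neg (show ¬ (appmem.length : Int) > 2 * k by omega)]
    by_cases hb2 : k ≥ (appmem.length : Int)
    · rw [if_pos hb2, if_pos hb2]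
    · rw [if_neg hb2, if_neg hb2]
      exact pvMainBranch appmem k (by omega) (by omega)

-- ===== VERDICT (by name: the statement is the Claim_ definition above) =====
theorem minimum_mem_cap_spec : Claim_equal_minimum_mem_cap := by
  intro appmem k _ _
  unfold Spec_minimum_mem_cap
  exact pvEquiv appmem k
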